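-- pv_equiv track=rewrite | github.com/hendrickmelo/versionable | src/versionable/_yaml_backend.py | _parseTopLevelBlocks
-- ===== SOURCE A (Python) =====
-- def _parseTopLevelBlocks(content: str) -> dict[str, str]:
--     """Parse YAML content into top-level blocks keyed by field name.
--
--     Each block includes the key line and all indented continuation lines.
--     """
--     blocks: dict[str, str] = {}
--     lines = content.splitlines(keepends=True)
--     currentKey: str | None = None
--     currentLines: list[str] = []
--
--     for line in lines:
--         stripped = line.rstrip("\n")
--
--         # Top-level key
--         if stripped and not stripped[0].isspace() and ":" in stripped:
--             # Save previous block
--             if currentKey is not None: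
--                 blocks[currentKey] = "".join(currentLines)
--             currentKey = stripped.split(":")[0]
--             currentLines = [line]
--         elif currentKey is not None:
--             # Continuation (indented or bare list item)
--             if stripped and (stripped[0].isspace() or stripped.startswith("- ")):
--                 currentLines.append(line)
--             elif not stripped:
--                 # Blank line — include in block
--                 currentLines.append(line)
--             else:
--                 # New non-indented line that isn't a key — save and reset
--                 blocks[currentKey] = "".join(currentLines)
--                 currentKey = None
--                 currentLines = []
--         # else: skip lines before first key
--
--     if currentKey is not None:
--         blocks[currentKey] = "".join(currentLines)
--
--     return blocks
-- ===== SOURCE B (Python) =====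
-- def _parseTopLevelBlocks(content: str) -> dict[str, str]:
--     """Parse YAML content into top-level blocks keyed by field name.
--
--     Nested-loop parser: an outer index loop finds each top-level key line,
--     an inner loop consumes that key's continuation lines directly.
--     """
--     blocks: dict[str, str] = {}
--     lines = content.splitlines(keepends=True)
--     n = len(lines)
--     i = 0
--     while i < n:
--         stripped = lines[i].rstrip("\n")
--         if stripped and not stripped[0].isspace() and ":" in stripped:
--             key = stripped.split(":")[0]
--             block = [lines[i]]
--             i += 1
--             while i < n:
--                 st = lines[i].rstrip("\n")
--                 if st and not st[0].isspace() and ":" in st: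
--                     break  # next top-level key: re-examined by the outer loop
--                 if not st or st[0].isspace() or st.startswith("- "):
--                     block.append(lines[i])
--                     i += 1
--                 else:
--                     break  # non-indented non-key line: outer loop will skip it
--             blocks[key] = "".join(block)
--         else:
--             i += 1  # line outside any block: skipped
--     return blocks
-- ===== Notes on version B (the rewrite author's own statement) =====
-- stated objective: alternative
-- what changed: Replaced A's single streaming pass with carried currentKey/currentLines state by a nested-loop parser: an outer index loop finds each top-level key line and an inner loop consumes that key's continuation lines directly, storing the finished block immediately.
import Mathlib
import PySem

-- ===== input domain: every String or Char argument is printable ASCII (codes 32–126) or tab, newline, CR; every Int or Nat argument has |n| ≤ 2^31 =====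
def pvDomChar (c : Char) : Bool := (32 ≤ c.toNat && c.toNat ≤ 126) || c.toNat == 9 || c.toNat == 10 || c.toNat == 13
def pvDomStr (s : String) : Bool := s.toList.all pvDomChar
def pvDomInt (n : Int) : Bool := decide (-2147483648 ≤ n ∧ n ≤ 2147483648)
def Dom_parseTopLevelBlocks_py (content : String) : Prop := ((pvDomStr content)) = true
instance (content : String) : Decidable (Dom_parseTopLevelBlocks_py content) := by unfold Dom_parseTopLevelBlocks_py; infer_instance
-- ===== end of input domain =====

-- B replaces A's streaming pass with carried currentKey/currentLines state by a nested-loop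
-- parser (outer loop finds key lines, inner loop consumes each block directly); objective: alternative.


-- shared helpers: both Pythons call content.splitlines(keepends=True), line.rstrip("\n"),
-- stripped.split(":")[0] and the same key/continuation tests, so both ports use these.

-- s.splitlines(keepends=True); exact on the domain (line terminators are '\n', '\r', '\r\n')
def splitKeepends : List Char → List Char → List (List Char)
  | acc, [] => if acc = [] then [] else [acc.reverse]
  | acc, '\n' :: rest => (acc.reverse ++ ['\n']) :: splitKeepends [] rest
  | acc, '\r' :: '\n' :: rest => (acc.reverse ++ ['\r', '\n']) :: splitKeepends [] rest
  | acc, '\r' :: rest => (acc.reverse ++ ['\r']) :: splitKeepends [] rest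
  | acc, c :: rest => splitKeepends (c :: acc) rest

-- line.rstrip("\n"): drop trailing '\n' characters (exact)
def rstripNl (cs : List Char) : List Char := (cs.reverse.dropWhile (· == '\n')).reverse

-- stripped.split(":")[0]: the prefix before the first ':' (the whole string if none) — exact
def keyOf (st : List Char) : List Char := st.takeWhile (· ≠ ':')

-- stripped and not stripped[0].isspace() and ":" in stripped
def isKeyLine : List Char → Bool
  | [] => false
  | c :: cs => !PySem.Chars.isspace c && (c :: cs).contains ':'

-- stripped and (stripped[0].isspace() or stripped.startswith("- "))
def contLine : List Char → Bool
  | [] => false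
  | c :: cs => PySem.Chars.isspace c || PySem.Chars.startswith (c :: cs) ['-', ' ']

-- ===== PORT A =====
-- 'if currentKey is not None: blocks[currentKey] = "".join(currentLines)'
def saveA (blocks : PySem.Dict String String) (curKey : Option (List Char))
    (curLines : List (List Char)) : PySem.Dict String String :=
  match curKey with
  | none => blocks
  | some k => blocks.insert (String.ofList k) (String.ofList curLines.flatten)

-- one iteration of A's for-loop over (blocks, currentKey, currentLines)
def stepA (s : PySem.Dict String String × Option (List Char) × List (List Char))
    (line : List Char) : PySem.Dict String String × Option (List Char) × List (List Char) :=
  let (blocks, curKey, curLines) := s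
  let st := rstripNl line
  if isKeyLine st then
    (saveA blocks curKey curLines, some (keyOf st), [line])
  else
    match curKey with
    | some k =>
      if contLine st then (blocks, curKey, curLines ++ [line])
      else if st = [] then (blocks, curKey, curLines ++ [line])
      else (blocks.insert (String.ofList k) (String.ofList curLines.flatten), none, [])
    | none => (blocks, none, curLines)

def parseTopLevelBlocks_py (content : String) : List (String × String) :=
  let lines := splitKeepends [] content.toList
  let s := lines.foldl stepA (PySem.Dict.empty, none, [])
  (saveA s.1 s.2.1 s.2.2).items

-- ===== PORT B =====
-- B's inner while loop: consume continuation lines, return (block_tail, unconsumed rest)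
def innerB : List (List Char) → List (List Char) × List (List Char)
  | [] => ([], [])
  | line :: rest =>
    let st := rstripNl line
    if isKeyLine st then ([], line :: rest)
    else if st = [] || contLine st then
      let p := innerB rest
      (line :: p.1, p.2)
    else ([], line :: rest)

theorem innerB_len (ls : List (List Char)) : (innerB ls).2.length ≤ ls.length := by
  induction ls with
  | nil => simp [innerB]
  | cons line rest ih =>
    simp only [innerB]
    split_ifs with h1 h2
    · simp
    · simpa using Nat.le_succ_of_le ih
    · simp

-- B's outer while loop over the remaining lines
def outerB : List (List Char) → PySem.Dict String String → PySem.Dict String String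
  | [], blocks => blocks
  | line :: rest, blocks =>
    let st := rstripNl line
    if isKeyLine st then
      let p := innerB rest
      outerB p.2 (blocks.insert (String.ofList (keyOf st)) (String.ofList (line :: p.1).flatten))
    else outerB rest blocks
termination_by ls _ => ls.length
decreasing_by
  · exact Nat.lt_succ_of_le (innerB_len rest)
  · simp

def parseTopLevelBlocks_py_alt (content : String) : List (String × String) :=
  (outerB (splitKeepends [] content.toList) PySem.Dict.empty).items

-- ===== PRECONDITION & SPEC =====
def Spec_parseTopLevelBlocks_py (content : String) (out : List (String × String)) : Prop := out = parseTopLevelBlocks_py_alt content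
instance (content : String) (out : List (String × String)) : Decidable (Spec_parseTopLevelBlocks_py content out) := by unfold Spec_parseTopLevelBlocks_py; infer_instance

-- ===== CLAIM (what is proved, stated in full; the proofs are below) =====
def Claim_equal_parseTopLevelBlocks_py : Prop := ∀ (content : String), Dom_parseTopLevelBlocks_py content → Spec_parseTopLevelBlocks_py content (parseTopLevelBlocks_py content)

-- ===== LEMMAS AND PROOFS =====

theorem saveA_none (b : PySem.Dict String String) (c : List (List Char)) :
    saveA b none c = b := rfl

theorem saveA_some (b : PySem.Dict String String) (k : List Char) (c : List (List Char)) :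
    saveA b (some k) c = b.insert (String.ofList k) (String.ofList c.flatten) := rfl

theorem stepA_key (b : PySem.Dict String String) (ck : Option (List Char))
    (cl : List (List Char)) (line : List Char) (h : isKeyLine (rstripNl line) = true) :
    stepA (b, ck, cl) line = (saveA b ck cl, some (keyOf (rstripNl line)), [line]) := by
  simp [stepA, h]

theorem stepA_none (b : PySem.Dict String String) (cl : List (List Char)) (line : List Char)
    (h : ¬ isKeyLine (rstripNl line) = true) :
    stepA (b, none, cl) line = (b, none, cl) := by
  simp [stepA, h]

theorem stepA_cont (b : PySem.Dict String String) (k : List Char) (cl : List (List Char))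
    (line : List Char) (hk : ¬ isKeyLine (rstripNl line) = true)
    (h : rstripNl line = [] ∨ contLine (rstripNl line) = true) :
    stepA (b, some k, cl) line = (b, some k, cl ++ [line]) := by
  rcases h with h | h
  · simp [stepA, h, show isKeyLine [] = false from rfl]
  · simp [stepA, hk, h]

theorem stepA_brk (b : PySem.Dict String String) (k : List Char) (cl : List (List Char))
    (line : List Char) (hk : ¬ isKeyLine (rstripNl line) = true)
    (h1 : ¬ rstripNl line = []) (h2 : ¬ contLine (rstripNl line) = true) :
    stepA (b, some k, cl) line =
      (b.insert (String.ofList k) (String.ofList cl.flatten), none, []) := by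
  simp [stepA, hk, h1, h2]

theorem innerB_key (line : List Char) (rest : List (List Char))
    (h : isKeyLine (rstripNl line) = true) :
    innerB (line :: rest) = ([], line :: rest) := by
  simp [innerB, h]

theorem innerB_cont (line : List Char) (rest : List (List Char))
    (hk : ¬ isKeyLine (rstripNl line) = true)
    (h : rstripNl line = [] ∨ contLine (rstripNl line) = true) :
    innerB (line :: rest) = (line :: (innerB rest).1, (innerB rest).2) := by
  rcases h with h | h
  · simp [innerB, h, show isKeyLine [] = false from rfl]
  · simp [innerB, hk, h]

theorem innerB_brk (line : List Char) (rest : List (List Char))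
    (hk : ¬ isKeyLine (rstripNl line) = true)
    (h1 : ¬ rstripNl line = []) (h2 : ¬ contLine (rstripNl line) = true) :
    innerB (line :: rest) = ([], line :: rest) := by
  simp [innerB, hk, h1, h2]

theorem outerB_key (line : List Char) (rest : List (List Char))
    (b : PySem.Dict String String) (h : isKeyLine (rstripNl line) = true) :
    outerB (line :: rest) b =
      outerB (innerB rest).2
        (b.insert (String.ofList (keyOf (rstripNl line)))
          (String.ofList (line :: (innerB rest).1).flatten)) := by
  rw [outerB]; simp [h]

theorem outerB_skip (line : List Char) (rest : List (List Char))
    (b : PySem.Dict String String) (h : ¬ isKeyLine (rstripNl line) = true) :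
    outerB (line :: rest) b = outerB rest b := by
  rw [outerB]; simp [h]

-- the two loop shapes agree: A's fold from a no-key state equals B's outer loop,
-- and A's fold from an open-block state equals saving cur ++ inner block then B's outer loop
theorem main_lemma (ls : List (List Char)) :
    (∀ blocks, saveA (ls.foldl stepA (blocks, none, ([] : List (List Char)))).1
        (ls.foldl stepA (blocks, none, [])).2.1 (ls.foldl stepA (blocks, none, [])).2.2
      = outerB ls blocks)
    ∧ (∀ blocks (k : List Char) (cur : List (List Char)),
        saveA (ls.foldl stepA (blocks, some k, cur)).1
          (ls.foldl stepA (blocks, some k, cur)).2.1 (ls.foldl stepA (blocks, some k, cur)).2.2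
        = outerB (innerB ls).2
            (blocks.insert (String.ofList k) (String.ofList (cur ++ (innerB ls).1).flatten))) := by
  induction ls with
  | nil =>
    constructor
    · intro blocks; simp [outerB, saveA]
    · intro blocks k cur; simp [innerB, outerB, saveA]
  | cons line rest ih =>
    obtain ⟨ih0, ih1⟩ := ih
    by_cases hk : isKeyLine (rstripNl line) = true
    · constructor
      · intro blocks
        rw [List.foldl_cons, stepA_key _ _ _ _ hk, saveA_none, ih1, outerB_key _ _ _ hk]
        simp
      · intro blocks k cur
        rw [List.foldl_cons, stepA_key _ _ _ _ hk, saveA_some, ih1,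
          innerB_key _ _ hk, outerB_key _ _ _ hk]
        simp
    · by_cases hc : rstripNl line = [] ∨ contLine (rstripNl line) = true
      · constructor
        · intro blocks
          rw [List.foldl_cons, stepA_none _ _ _ hk, ih0, outerB_skip _ _ _ hk]
        · intro blocks k cur
          rw [List.foldl_cons, stepA_cont _ _ _ _ hk hc, ih1, innerB_cont _ _ hk hc]
          simp
      · obtain ⟨h1, h2⟩ := not_or.mp hc
        constructor
        · intro blocks
          rw [List.foldl_cons, stepA_none _ _ _ hk, ih0, outerB_skip _ _ _ hk]
        · intro blocks k cur
          rw [List.foldl_cons, stepA_brk _ _ _ _ hk h1 h2, ih0,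
            innerB_brk _ _ hk h1 h2, outerB_skip _ _ _ hk]
          simp

-- ===== VERDICT (by name: the statement is the Claim_ definition above) =====
theorem parseTopLevelBlocks_py_spec : Claim_equal_parseTopLevelBlocks_py := by
  intro content _
  exact congrArg PySem.Dict.items ((main_lemma (splitKeepends [] content.toList)).1 PySem.Dict.empty)
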